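-- pv_equiv track=rewrite | github.com/karthiknach52/BIO | mrjones2.py | recurse
-- ===== SOURCE A (Python) =====
-- def recurse(input:list, missing:list, duplicate:list, count:int):
--
--     j = 0
--     while j < len(input) and input[j] != None:
--         j += 1
--
--     if j == len(input):
--         return missing, duplicate, (count + 1)
--
--     i = 0
--     while i < len(input) and input[i] != duplicate[0]:
--         i += 1
--
--     t_duplicate = duplicate.copy()
--     t_duplicate.pop(0)
--
--     k = 0
--     while k < len(missing) and missing[k] < input[i]:
--         input[j] = missing[k]
--         t_missing = missing.copy()
--         t_missing.pop(k)
--         a_missing, a_duplicate, count = recurse(input, t_missing, t_duplicate, count)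
--         input[j] = None
--         k += 1
--
--     return missing, duplicate, count
-- ===== SOURCE B (Python) =====
-- # B: explicit DFS over a work-stack of immutable frames instead of tree recursion
-- # with in-place mutate/restore; return value only (A leaves input net-unchanged).
-- def recurse(input, missing, duplicate, count):
--     total = count
--     stack = [(tuple(input), tuple(missing), tuple(duplicate))]
--     while stack:
--         inp, mis, dup = stack.pop()
--         if None not in inp:
--             total += 1
--             continue
--         j = inp.index(None)
--         v = dup[0]
--         rest = dup[1:]
--         for k, m in enumerate(mis):
--             if not (m < v):
--                 break
--             stack.append((inp[:j] + (m,) + inp[j + 1:], mis[:k] + mis[k + 1:], rest))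
--     return missing, duplicate, total
-- ===== Notes on version B (the rewrite author's own statement) =====
-- stated objective: alternative
-- what changed: The tree recursion with in-place mutate/restore of input is replaced by an iterative DFS over an explicit work-stack of immutable (input, missing, duplicate) frames that accumulates the leaf count in one total.
import Mathlib
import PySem

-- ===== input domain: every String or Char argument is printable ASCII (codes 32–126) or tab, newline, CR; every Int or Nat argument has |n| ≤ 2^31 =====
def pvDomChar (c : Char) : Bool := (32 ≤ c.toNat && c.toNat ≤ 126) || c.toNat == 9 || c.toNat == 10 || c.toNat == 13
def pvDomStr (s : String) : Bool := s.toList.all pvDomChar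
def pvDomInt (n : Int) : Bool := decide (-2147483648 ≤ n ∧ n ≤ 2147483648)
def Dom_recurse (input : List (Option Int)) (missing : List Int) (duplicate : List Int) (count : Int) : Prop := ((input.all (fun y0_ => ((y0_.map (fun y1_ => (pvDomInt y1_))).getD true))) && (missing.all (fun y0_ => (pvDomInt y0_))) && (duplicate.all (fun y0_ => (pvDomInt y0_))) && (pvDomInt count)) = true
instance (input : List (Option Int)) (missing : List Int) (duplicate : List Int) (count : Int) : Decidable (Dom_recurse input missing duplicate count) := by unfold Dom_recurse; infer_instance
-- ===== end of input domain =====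

-- B replaces A's tree recursion (which mutates `input` in place and restores it, net
-- unchanged) by an iterative DFS over an explicit work-stack of immutable frames; the
-- equivalence is about the return value (A's in-place mutation is restored before returning).

def countNones (l : List (Option Int)) : Nat := l.countP (·.isNone)

-- used by the termination arguments of both ports
theorem countNones_set (l : List (Option Int)) (j : Nat) (x : Int)
    (h : l[j]? = some none) : countNones (l.set j (some x)) + 1 = countNones l := by
  induction l generalizing j with
  | nil => simp at h
  | cons a t ih =>
    cases j with
    | zero =>
      simp at h; subst h
      simp [countNones]
    | succ j =>
      simp at h
      simp [countNones, List.countP_cons] at *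
      have := ih j h
      omega

theorem countNones_set_lt (l : List (Option Int)) (j : Nat) (x : Int)
    (h : l[j]? = some none) : countNones (l.set j (some x)) < countNones l := by
  have := countNones_set l j x h
  omega

-- ===== PORT A =====
-- Transliteration of A: the two scanning `while` loops become `findIdx`; the `while k`
-- loop with the recursive call is `kloop` (the in-place `input[j] = missing[k]` /
-- `input[j] = None` pair is `input.set j (some missing[k])` on a pure list, the restore
-- being a no-op on the unchanged original).  Where the Python raises (duplicate[0] on an
-- empty list, input[i] with i = len(input) and missing nonempty) the port returns the
-- current (missing, duplicate, count) / count; those inputs are excluded by Pre_recurse.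
mutual
def recurse (input : List (Option Int)) (missing : List Int) (duplicate : List Int) (count : Int) :
    List Int × List Int × Int :=
  let j := input.findIdx (·.isNone)
  if hj : j = input.length then (missing, duplicate, count + 1)
  else
    match duplicate with
    | [] => (missing, duplicate, count)        -- Python: duplicate[0] raises IndexError
    | d0 :: drest =>
      let i := input.findIdx (· == some d0)
      match input[i]? with
      | some (some v) =>
        have hjn : input[j]? = some none := by
          have hlt : j < input.length := Nat.lt_of_le_of_ne (List.findIdx_le_length) hj
          have hp := List.findIdx_getElem (w := hlt)
          simp only [Option.isNone_iff_eq_none] at hp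
          rw [List.getElem?_eq_getElem hlt]; exact congrArg some hp
        (missing, duplicate, kloop input missing drest j v 0 count hjn)
      | _ => (missing, duplicate, count)       -- Python: input[i] raises IndexError unless
                                               -- missing = [] (when the k-loop is never entered
                                               -- and A returns this very value)
termination_by (countNones input, 1, 0)
decreasing_by
  exact Prod.Lex.right _ (Prod.Lex.left _ _ (by omega))

def kloop (input : List (Option Int)) (missing drest : List Int) (j : Nat) (v : Int)
    (k : Nat) (count : Int) (hjn : input[j]? = some none) : Int :=
  if hk : k < missing.length then
    if missing[k] < v then
      kloop input missing drest j v (k + 1)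
        ((recurse (input.set j (some missing[k])) (missing.eraseIdx k) drest count).2.2) hjn
    else count
  else count
termination_by (countNones input, 0, missing.length - k)
decreasing_by
  · exact Prod.Lex.left _ _ (countNones_set_lt _ _ _ hjn)
  · exact Prod.Lex.right _ (Prod.Lex.right _ (by omega))
end

-- ===== PORT B =====
-- Transliteration of B (Source B): an explicit work-stack, head = top; pushing the children
-- left to right and popping from the end is pushing `children.reverse` on the head.

def frameW (f : List (Option Int) × List Int × List Int) : Nat :=
  (f.2.1.length + 1) ^ countNones f.1

def stackW (s : List (List (Option Int) × List Int × List Int)) : Nat :=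
  (s.map frameW).sum

theorem frameW_pos (f : List (Option Int) × List Int × List Int) : 0 < frameW f :=
  Nat.one_le_pow _ _ (Nat.succ_pos _)

theorem idxOf_none_spec (inp : List (Option Int)) (h : none ∈ inp) :
    inp[inp.idxOf none]? = some none := by
  have hlt : inp.idxOf none < inp.length := List.idxOf_lt_length_of_mem h
  rw [List.getElem?_eq_getElem hlt]
  exact congrArg some (List.getElem_idxOf hlt)

-- used by drain's termination argument
theorem stackW_children_lt (inp : List (Option Int)) (mis drest : List Int) (v : Int)
    (h : none ∈ inp) :
    stackW (((mis.zipIdx.takeWhile (fun p => decide (p.1 < v))).map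
      (fun p => (inp.set (inp.idxOf none) (some p.1), mis.eraseIdx p.2, drest))) : List _)
      < frameW (inp, mis, v :: drest) := by
  have hjn := idxOf_none_spec inp h
  have hn1 : 1 ≤ countNones inp := by
    have : ¬ countNones inp = 0 := by
      intro h0
      have := List.countP_eq_zero.mp h0 none h
      simp at this
    omega
  set n := countNones inp with hn
  have hchild : ∀ f ∈ ((mis.zipIdx.takeWhile (fun p => decide (p.1 < v))).map
      (fun p => (inp.set (inp.idxOf none) (some p.1), mis.eraseIdx p.2, drest))),
      frameW f = mis.length ^ (n - 1) := by
    intro f hf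
    rw [List.mem_map] at hf
    obtain ⟨p, hp, rfl⟩ := hf
    have hpz : p ∈ mis.zipIdx := List.takeWhile_subset _ hp
    have hk : p.2 < mis.length ∧ mis[p.2]? = some p.1 := by
      obtain ⟨a, i⟩ := p
      rw [List.mk_mem_zipIdx_iff_getElem?] at hpz
      simp at hpz ⊢
      exact ⟨by rw [List.getElem?_eq_some_iff] at hpz; exact hpz.1, hpz⟩
    have hlen : (mis.eraseIdx p.2).length = mis.length - 1 := List.length_eraseIdx_of_lt hk.1
    have hcn : countNones (inp.set (inp.idxOf none) (some p.1)) = n - 1 := by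
      have := countNones_set inp (inp.idxOf none) p.1 hjn
      omega
    simp only [frameW, hlen, hcn]
    congr 1
    omega
  calc stackW _ ≤ _ := List.sum_le_card_nsmul _ (mis.length ^ (n - 1)) (by
        intro x hx
        rw [List.mem_map] at hx
        obtain ⟨f, hf, rfl⟩ := hx
        exact le_of_eq (hchild f hf))
    _ ≤ mis.length * mis.length ^ (n - 1) := by
        simp only [smul_eq_mul, List.length_map]
        have : ((mis.zipIdx.takeWhile (fun p => decide (p.1 < v))).length) ≤ mis.length := by
          have := (List.takeWhile_sublist (p := fun p => decide (p.1 < v)) (l := mis.zipIdx)).length_le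
          simpa using this
        exact Nat.mul_le_mul_right _ this
    _ = mis.length ^ n := by
        rw [← pow_succ']
        congr 1
        omega
    _ < (mis.length + 1) ^ n := Nat.pow_lt_pow_left (by omega) (by omega)

def drain (stack : List (List (Option Int) × List Int × List Int)) (total : Int) : Int :=
  match stack with
  | [] => total
  | (inp, mis, []) :: rest =>
    if none ∈ inp then total                   -- Python: dup[0] raises IndexError here
    else drain rest (total + 1)
  | (inp, mis, v :: drest) :: rest =>
    if h : none ∈ inp then
      let j := inp.idxOf none
      let ch := (mis.zipIdx.takeWhile (fun p => decide (p.1 < v))).map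
        (fun p => (inp.set j (some p.1), mis.eraseIdx p.2, drest))
      drain (ch.reverse ++ rest) total
    else
      drain rest (total + 1)
termination_by stackW stack
decreasing_by
  · have h1 := frameW_pos (inp, mis, ([] : List Int))
    simp only [stackW, List.map_cons, List.sum_cons]
    omega
  · have h1 := stackW_children_lt inp mis drest v h
    simp only [stackW, List.map_append, List.map_reverse, List.sum_append, List.sum_reverse,
      List.map_cons, List.sum_cons] at *
    omega
  · have h1 := frameW_pos (inp, mis, v :: drest)
    simp only [stackW, List.map_cons, List.sum_cons]
    omega

def recurse_alt (input : List (Option Int)) (missing : List Int) (duplicate : List Int) (count : Int) :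
    List Int × List Int × Int :=
  (missing, duplicate, drain [(input, missing, duplicate)] count)

-- ===== PRECONDITION & SPEC =====
-- Pre_recurse excludes the inputs on which the recursion dereferences past `duplicate`
-- or past `input` (A raises IndexError).  It is a closed-form SUFFICIENT condition
-- (enough of `duplicate` available, each consulted duplicate value present in `input`),
-- so it also excludes a few inputs where A still returns because a branch is cut early;
-- B returns the same value on those (see the cites in the claim).
def Pre_recurse (input : List (Option Int)) (missing : List Int) (duplicate : List Int) (count : Int) : Prop :=
  (missing = [] → (countNones input = 0 ∨ duplicate ≠ [])) ∧
  (missing ≠ [] → countNones input ≤ duplicate.length ∧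
      ∀ d ∈ duplicate.take (countNones input), (some d : Option Int) ∈ input)
instance (input : List (Option Int)) (missing : List Int) (duplicate : List Int) (count : Int) : Decidable (Pre_recurse input missing duplicate count) := by unfold Pre_recurse; infer_instance

def pvWitness_recurse : List (Option Int) × List Int × List Int × Int :=
  ([some 1, none], [0], [1], 0)

def Spec_recurse (input : List (Option Int)) (missing : List Int) (duplicate : List Int) (count : Int) (out : List Int × List Int × Int) : Prop := out = recurse_alt input missing duplicate count
instance (input : List (Option Int)) (missing : List Int) (duplicate : List Int) (count : Int) (out : List Int × List Int × Int) : Decidable (Spec_recurse input missing duplicate count out) := by unfold Spec_recurse; infer_instance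

-- ===== CLAIM =====
def Claim_equal_recurse : Prop := ∀ (input : List (Option Int)) (missing : List Int) (duplicate : List Int) (count : Int), Dom_recurse input missing duplicate count → Pre_recurse input missing duplicate count → Spec_recurse input missing duplicate count (recurse input missing duplicate count)

-- ===== LEMMAS AND PROOFS =====

theorem recurse_shape (input : List (Option Int)) (missing duplicate : List Int) (count : Int) :
    ∃ z, recurse input missing duplicate count = (missing, duplicate, z) := by
  rw [recurse.eq_def]
  dsimp only
  split
  · exact ⟨_, rfl⟩
  · split
    · exact ⟨_, rfl⟩
    · split
      · exact ⟨_, rfl⟩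
      · exact ⟨_, rfl⟩

theorem findIdx_isNone_eq_idxOf_none (l : List (Option Int)) :
    l.findIdx (·.isNone) = l.idxOf none := by
  have : (fun (o : Option Int) => o.isNone) = (fun (o : Option Int) => o == none) := by
    funext o; cases o <;> rfl
  rw [List.idxOf, this]

theorem mem_set_of_mem (l : List (Option Int)) (j : Nat) (x a : Int)
    (ha : (some a : Option Int) ∈ l) (hj : l[j]? = some none) :
    (some a : Option Int) ∈ l.set j (some x) := by
  obtain ⟨p, hp, hpa⟩ := List.getElem_of_mem ha
  have hpj : p ≠ j := by
    intro h
    subst h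
    rw [List.getElem?_eq_getElem hp] at hj
    simp [hpa] at hj
  have hps : (l.set j (some x))[p]'(by simpa using hp) = some a := by
    rw [List.getElem_set_ne (by omega)]
    exact hpa
  exact hps ▸ List.getElem_mem _

mutual
theorem recurse_shift (input : List (Option Int)) (missing duplicate : List Int) (c : Int) :
    (recurse input missing duplicate c).2.2 = c + (recurse input missing duplicate 0).2.2 := by
  rw [recurse.eq_def, recurse.eq_def]
  dsimp only
  by_cases hj : input.findIdx (·.isNone) = input.length
  · simp only [dif_pos hj]
    omega
  · simp only [dif_neg hj]
    cases duplicate with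
    | nil => simp
    | cons d0 drest =>
      cases hv : input[input.findIdx (· == some d0)]? with
      | none => simp [hv]
      | some o =>
        cases o with
        | none => simp [hv]
        | some v =>
          simp only [hv]
          exact kloop_shift input missing drest (input.findIdx (·.isNone)) v 0 c _
termination_by (countNones input, 1, 0)
decreasing_by
  exact Prod.Lex.right _ (Prod.Lex.left _ _ (by omega))

theorem kloop_shift (input : List (Option Int)) (missing drest : List Int) (j : Nat) (v : Int)
    (k : Nat) (c : Int) (hjn : input[j]? = some none) :
    kloop input missing drest j v k c hjn = c + kloop input missing drest j v k 0 hjn := by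
  rw [kloop.eq_def, kloop.eq_def]
  by_cases hk : k < missing.length
  · simp only [dif_pos hk]
    by_cases hv : missing[k] < v
    · simp only [if_pos hv]
      have s1 := recurse_shift (input.set j (some missing[k])) (missing.eraseIdx k) drest c
      have s2 := kloop_shift input missing drest j v (k + 1)
        ((recurse (input.set j (some missing[k])) (missing.eraseIdx k) drest c).2.2) hjn
      have s3 := kloop_shift input missing drest j v (k + 1)
        ((recurse (input.set j (some missing[k])) (missing.eraseIdx k) drest 0).2.2) hjn
      omega
    · simp only [if_neg hv]
      omega
  · simp only [dif_neg hk]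
    omega
termination_by (countNones input, 0, missing.length - k)
decreasing_by
  · exact Prod.Lex.left _ _ (countNones_set_lt _ _ _ hjn)
  · exact Prod.Lex.right _ (Prod.Lex.right _ (by omega))
  · exact Prod.Lex.right _ (Prod.Lex.right _ (by omega))
end

theorem countNones_pos_of_mem (inp : List (Option Int)) (h : none ∈ inp) :
    1 ≤ countNones inp := by
  have : ¬ countNones inp = 0 := by
    intro h0
    have := List.countP_eq_zero.mp h0 none h
    simp at this
  omega

theorem kloop_congr (inp : List (Option Int)) (mis drest : List Int) (j j' : Nat) (v : Int)
    (k : Nat) (c : Int) (h : j = j') (h1 : inp[j]? = some none) (h2 : inp[j']? = some none) :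
    kloop inp mis drest j v k c h1 = kloop inp mis drest j' v k c h2 := by
  subst h; rfl

mutual
theorem drain_cons (inp : List (Option Int)) (mis dup : List Int)
    (rest : List (List (Option Int) × List Int × List Int)) (total : Int)
    (hP : (mis = [] → (countNones inp = 0 ∨ dup ≠ [])) ∧
      (mis ≠ [] → countNones inp ≤ dup.length ∧
        ∀ d ∈ dup.take (countNones inp), (some d : Option Int) ∈ inp)) :
    drain ((inp, mis, dup) :: rest) total = drain rest ((recurse inp mis dup total).2.2) := by
  by_cases hmm : none ∈ inp
  case neg =>
    -- no None left: A's first scan runs off the end, both count the filled input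
    have hlen : inp.findIdx (·.isNone) = inp.length := by
      apply List.findIdx_eq_length.mpr
      intro a ha
      cases a with
      | none => exact absurd ha hmm
      | some _ => simp
    rw [recurse.eq_def]
    dsimp only
    rw [dif_pos hlen]
    cases dup with
    | nil => rw [drain.eq_def]; simp [hmm]
    | cons v drest => rw [drain.eq_def]; simp [hmm]
  case pos =>
    have hn1 : 1 ≤ countNones inp := countNones_pos_of_mem inp hmm
    have hne : inp.findIdx (·.isNone) ≠ inp.length := by
      have := List.findIdx_lt_length_of_exists (xs := inp) (p := (·.isNone)) ⟨none, hmm, rfl⟩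
      omega
    cases dup with
    | nil =>
      exfalso
      by_cases hm : mis = []
      · rcases hP.1 hm with h0 | h0 <;> simp_all
      · have := (hP.2 hm).1
        simp at this
        omega
    | cons v drest =>
      have hjeq : inp.findIdx (·.isNone) = inp.idxOf none := findIdx_isNone_eq_idxOf_none inp
      have hjn : inp[(inp.idxOf none)]? = some none := idxOf_none_spec inp hmm
      rw [drain.eq_def]
      dsimp only
      rw [dif_pos hmm, recurse.eq_def]
      dsimp only
      rw [dif_neg hne]
      cases hm : mis with
      | nil =>
        -- no candidates: no children pushed, and A's k-loop never runs
        simp only [List.zipIdx_nil, List.takeWhile_nil, List.map_nil, List.reverse_nil,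
          List.nil_append]
        cases hv : inp[inp.findIdx (· == some v)]? with
        | none => rfl
        | some o =>
          cases o with
          | none => rfl
          | some w =>
            dsimp only
            rw [kloop.eq_def]
            simp
      | cons m0 mtl =>
        rw [← hm]
        have hmne : mis ≠ [] := by simp [hm]
        obtain ⟨hlen, hmemP⟩ := hP.2 hmne
        obtain ⟨n', hn'⟩ : ∃ n', countNones inp = n' + 1 := ⟨countNones inp - 1, by omega⟩
        have htake : (v :: drest).take (countNones inp) = v :: drest.take (countNones inp - 1) := by
          rw [hn', List.take_succ_cons]
          simp
        have hv0 : (some v : Option Int) ∈ inp := by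
          apply hmemP
          rw [htake]
          exact List.mem_cons_self
        have hi : inp[inp.findIdx (· == some v)]? = some (some v) := by
          have hilt : inp.findIdx (· == some v) < inp.length :=
            List.findIdx_lt_length_of_exists ⟨some v, hv0, by simp⟩
          have hp := List.findIdx_getElem (w := hilt)
          rw [List.getElem?_eq_getElem hilt]
          simp only [beq_iff_eq] at hp
          exact congrArg some hp
        rw [hi]
        dsimp only
        have h0 := drain_k inp mis drest v hjn
          (by simpa using hlen)
          (by intro d hd; apply hmemP; rw [htake]; exact List.mem_cons_of_mem _ hd)
          0 rest total
        rw [List.drop_zero] at h0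
        rw [kloop_congr inp mis drest _ _ v 0 total hjeq _ hjn]
        exact h0
termination_by (countNones inp, 1, 0)
decreasing_by
  exact Prod.Lex.right _ (Prod.Lex.left _ _ (by omega))

theorem drain_k (inp : List (Option Int)) (mis drest : List Int) (v : Int)
    (hjn : inp[(inp.idxOf none)]? = some none)
    (hlen : countNones inp ≤ drest.length + 1)
    (hmem : ∀ d ∈ drest.take (countNones inp - 1), (some d : Option Int) ∈ inp)
    (k : Nat) (rest : List (List (Option Int) × List Int × List Int)) (total : Int) :
    drain (((((mis.zipIdx.drop k).takeWhile (fun p => decide (p.1 < v))).map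
        (fun p => (inp.set (inp.idxOf none) (some p.1), mis.eraseIdx p.2, drest))).reverse ++ rest)) total
      = drain rest (kloop inp mis drest (inp.idxOf none) v k total hjn) := by
  rw [kloop.eq_def]
  by_cases hk : k < mis.length
  case neg =>
    have hdrop : mis.zipIdx.drop k = [] :=
      List.drop_of_length_le (by simp [List.length_zipIdx]; omega)
    rw [hdrop, dif_neg hk]
    simp
  case pos =>
    have hkz : k < mis.zipIdx.length := by simp [List.length_zipIdx]; omega
    have hdrop : mis.zipIdx.drop k = (mis[k], k) :: mis.zipIdx.drop (k + 1) := by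
      rw [List.drop_eq_getElem_cons hkz]
      congr 1
      simp [List.getElem_zipIdx]
    rw [hdrop, dif_pos hk]
    by_cases hv : mis[k] < v
    case neg =>
      rw [List.takeWhile_cons_of_neg (by simpa using hv), if_neg hv]
      simp
    case pos =>
      rw [List.takeWhile_cons_of_pos (by simpa using hv), if_pos hv]
      rw [List.map_cons, List.reverse_cons, List.append_assoc, List.singleton_append]
      rw [drain_k inp mis drest v hjn hlen hmem (k + 1)
        ((inp.set (inp.idxOf none) (some mis[k]), mis.eraseIdx k, drest) :: rest) total]
      have hcn : countNones (inp.set (inp.idxOf none) (some mis[k])) = countNones inp - 1 := by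
        have := countNones_set inp (inp.idxOf none) mis[k] hjn
        omega
      rw [drain_cons (inp.set (inp.idxOf none) (some mis[k])) (mis.eraseIdx k) drest rest _
        (by
          constructor
          · intro _
            by_cases h0 : countNones inp - 1 = 0
            · left; rw [hcn]; exact h0
            · right
              have : 1 ≤ drest.length := by omega
              exact List.ne_nil_iff_length_pos.mpr (by omega)
          · intro _
            constructor
            · rw [hcn]; omega
            · intro d hd
              rw [hcn] at hd
              exact mem_set_of_mem _ _ _ _ (hmem d hd) hjn)]
      congr 1
      have s1 := recurse_shift (inp.set (inp.idxOf none) (some mis[k])) (mis.eraseIdx k) drest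
        (kloop inp mis drest (inp.idxOf none) v (k + 1) total hjn)
      have s2 := recurse_shift (inp.set (inp.idxOf none) (some mis[k])) (mis.eraseIdx k) drest total
      have s3 := kloop_shift inp mis drest (inp.idxOf none) v (k + 1)
        ((recurse (inp.set (inp.idxOf none) (some mis[k])) (mis.eraseIdx k) drest total).2.2) hjn
      have s4 := kloop_shift inp mis drest (inp.idxOf none) v (k + 1) total hjn
      omega
termination_by (countNones inp, 0, mis.length - k)
decreasing_by
  · exact Prod.Lex.right _ (Prod.Lex.right _ (by omega))
  · exact Prod.Lex.left _ _ (countNones_set_lt _ _ _ hjn)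
end

-- ===== VERDICT =====
theorem recurse_spec : Claim_equal_recurse := by
  intro input missing duplicate count _hDom hPre
  show recurse input missing duplicate count = recurse_alt input missing duplicate count
  obtain ⟨z, hz⟩ := recurse_shape input missing duplicate count
  have h1 := drain_cons input missing duplicate [] count hPre
  rw [drain] at h1
  unfold recurse_alt
  rw [h1, hz]
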